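-- pv_equiv track=rewrite | github.com/changzhisun/AntNRE | joint_entrel/src/joint_model.py | generate_candi_rel
-- ===== SOURCE A (Python) =====
-- from typing import List, Dict, Any, Optional, Tuple, Set
--
-- def generate_candi_rel(entity_idx2type: Dict[Tuple, str]) -> Set[Tuple]:
--     candi_set = set()
--     for ent1_idx in entity_idx2type.keys():
--         for ent2_idx in entity_idx2type.keys():
--             if ent1_idx[0] >= ent2_idx[0]:
--                 continue
--             candi_set.add((ent1_idx, ent2_idx))
--     return candi_set
-- ===== SOURCE B (Python) =====
-- def generate_candi_rel(entity_idx2type):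
--     # Memoise the partner block per distinct first coordinate: keys sharing a
--     # first coordinate reuse one scan instead of re-filtering all keys.
--     keys = list(entity_idx2type.keys())
--     block = {}
--     out = []
--     for k1 in keys:
--         c = k1[0]
--         if c not in block:
--             block[c] = [k2 for k2 in keys if c < k2[0]]
--         out.extend((k1, k2) for k2 in block[c])
--     return set(out)
-- ===== Notes on version B (the rewrite author's own statement) =====
-- stated objective: alternative
-- what changed: Instead of re-testing every key pair with a nested scan, B memoises in a dict, per distinct first coordinate, the list of keys with strictly greater first coordinate, and emits each key's pair block from that cache, so duplicate first coordinates reuse one scan.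
import Mathlib
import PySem

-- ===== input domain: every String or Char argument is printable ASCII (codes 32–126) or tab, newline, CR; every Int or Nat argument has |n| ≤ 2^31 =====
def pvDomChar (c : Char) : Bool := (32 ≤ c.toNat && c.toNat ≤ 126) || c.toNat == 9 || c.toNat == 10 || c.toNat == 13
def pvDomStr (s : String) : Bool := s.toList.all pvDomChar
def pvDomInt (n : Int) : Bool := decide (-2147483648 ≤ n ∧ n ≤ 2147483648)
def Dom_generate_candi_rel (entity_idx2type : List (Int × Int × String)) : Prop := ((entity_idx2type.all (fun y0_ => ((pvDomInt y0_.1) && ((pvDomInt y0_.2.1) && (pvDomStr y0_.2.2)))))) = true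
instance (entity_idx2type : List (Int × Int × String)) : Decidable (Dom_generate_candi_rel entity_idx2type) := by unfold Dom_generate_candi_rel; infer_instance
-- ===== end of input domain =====

-- B memoises, per distinct first coordinate, the partner block (one dict built along the way)
-- instead of re-scanning all keys for every key; equivalence is about the returned set-as-list.

-- ===== PORT A =====
def generate_candi_rel (entity_idx2type : List (Int × Int × String)) : List ((Int × Int) × (Int × Int)) :=
  -- dict keys, in insertion order (first occurrences)
  let keys := PySem.List.dedup (entity_idx2type.map (fun x => (x.1, x.2.1)))
  keys.foldl (fun candi k1 =>
    keys.foldl (fun candi k2 =>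
      if k1.1 ≥ k2.1 then candi else PySem.Set.add candi (k1, k2)) candi)
    PySem.Set.empty

-- ===== PORT B =====
def generate_candi_rel_alt (entity_idx2type : List (Int × Int × String)) : List ((Int × Int) × (Int × Int)) :=
  let keys := PySem.List.dedup (entity_idx2type.map (fun x => (x.1, x.2.1)))
  let st := keys.foldl
    (fun (st : PySem.Dict Int (List (Int × Int)) × List ((Int × Int) × (Int × Int))) k1 =>
      let c := k1.1
      let block := if st.1.contains c then st.1
                   else st.1.insert c (keys.filter (fun k2 => decide (c < k2.1)))
      (block, st.2 ++ (block.getD c []).map (fun k2 => (k1, k2))))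
    (PySem.Dict.empty, [])
  PySem.Set.ofList st.2

-- ===== PRECONDITION & SPEC =====
def Spec_generate_candi_rel (entity_idx2type : List (Int × Int × String)) (out : List ((Int × Int) × (Int × Int))) : Prop := out = generate_candi_rel_alt entity_idx2type
instance (entity_idx2type : List (Int × Int × String)) (out : List ((Int × Int) × (Int × Int))) : Decidable (Spec_generate_candi_rel entity_idx2type out) := by unfold Spec_generate_candi_rel; infer_instance

-- ===== CLAIM (what is proved, stated in full; the proofs are below) =====
def Claim_equal_generate_candi_rel : Prop := ∀ (entity_idx2type : List (Int × Int × String)), Dom_generate_candi_rel entity_idx2type → Spec_generate_candi_rel entity_idx2type (generate_candi_rel entity_idx2type)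

-- ===== LEMMAS AND PROOFS =====

-- the pair block emitted for a given left key
def pvBlock (keys : List (Int × Int)) (k1 : Int × Int) : List ((Int × Int) × (Int × Int)) :=
  (keys.filter (fun k2 => decide (k1.1 < k2.1))).map (fun k2 => (k1, k2))

-- A's inner loop is a Set.update with the block
theorem pvA_inner (k1 : Int × Int) :
    ∀ (l : List (Int × Int)) (s : PySem.Set ((Int × Int) × (Int × Int))),
    l.foldl (fun candi k2 =>
      if k1.1 ≥ k2.1 then candi else PySem.Set.add candi (k1, k2)) s
    = PySem.Set.update s ((l.filter (fun k2 => decide (k1.1 < k2.1))).map (fun k2 => (k1, k2))) := by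
  intro l
  induction l with
  | nil => intro s; simp [PySem.Set.update]
  | cons a t ih =>
    intro s
    simp only [List.foldl_cons, List.filter_cons]
    by_cases h : k1.1 < a.1
    · have h' : ¬ k1.1 ≥ a.1 := by omega
      simp [h, h', ih, PySem.Set.update_cons]
    · have h' : k1.1 ≥ a.1 := by omega
      simp [h, h', ih]

-- A's nested loop is one Set.update with the flatMap of blocks
theorem pvA_outer (keys : List (Int × Int)) :
    ∀ (l : List (Int × Int)) (s : PySem.Set ((Int × Int) × (Int × Int))),
    l.foldl (fun candi k1 =>
      keys.foldl (fun candi k2 =>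
        if k1.1 ≥ k2.1 then candi else PySem.Set.add candi (k1, k2)) candi) s
    = PySem.Set.update s (l.flatMap (pvBlock keys)) := by
  intro l
  induction l with
  | nil => intro s; simp [PySem.Set.update]
  | cons a t ih =>
    intro s
    simp only [List.foldl_cons, List.flatMap_cons]
    rw [pvA_inner a keys s, ih, ← PySem.Set.update_append]
    rfl

-- B's loop: if the cache only ever holds correct blocks, the output is the flatMap of blocks
theorem pvB_loop (keys : List (Int × Int)) :
    ∀ (l : List (Int × Int)) (st : PySem.Dict Int (List (Int × Int)) × List ((Int × Int) × (Int × Int))),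
    (∀ c v, st.1.get? c = some v → v = keys.filter (fun k2 => decide (c < k2.1))) →
    (l.foldl
      (fun st k1 =>
        let c := k1.1
        let block := if st.1.contains c then st.1
                     else st.1.insert c (keys.filter (fun k2 => decide (c < k2.1)))
        (block, st.2 ++ (block.getD c []).map (fun k2 => (k1, k2))))
      st).2
    = st.2 ++ l.flatMap (pvBlock keys) := by
  intro l
  induction l with
  | nil => intro st _; simp
  | cons a t ih =>
    intro st hinv
    simp only [List.foldl_cons, List.flatMap_cons]
    by_cases hc : st.1.contains a.1
    · have hsome : ∃ v, st.1.get? a.1 = some v := by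
        rcases h : st.1.get? a.1 with _ | v
        · rw [PySem.Dict.contains_eq_isSome_get?, h] at hc; simp at hc
        · exact ⟨v, rfl⟩
      rcases hsome with ⟨v, hv⟩
      have hval := hinv _ _ hv
      rw [ih _ (by simpa [hc] using hinv)]
      simp [hc, PySem.Dict.getD_eq_get?_getD, hv, hval, pvBlock, List.append_assoc]
    · have hinv' : ∀ c v,
          (st.1.insert a.1 (keys.filter (fun k2 => decide (a.1 < k2.1)))).get? c = some v →
          v = keys.filter (fun k2 => decide (c < k2.1)) := by
        intro c v hget
        rw [PySem.Dict.get?_insert] at hget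
        by_cases hca : c = a.1
        · subst hca; simp at hget; exact hget.symm
        · rw [if_neg hca] at hget; exact hinv _ _ hget
      rw [ih _ (by simpa [hc] using hinv')]
      simp [hc, PySem.Dict.getD_eq_get?_getD, PySem.Dict.get?_insert_self, pvBlock,
        List.append_assoc]

-- ===== VERDICT (by name: the statement is the Claim_ definition above) =====
theorem generate_candi_rel_spec : Claim_equal_generate_candi_rel := by
  intro l _
  unfold Spec_generate_candi_rel generate_candi_rel generate_candi_rel_alt
  simp only []
  set keys := PySem.List.dedup (l.map (fun x => (x.1, x.2.1))) with hk
  rw [pvA_outer keys keys PySem.Set.empty]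
  rw [pvB_loop keys keys (PySem.Dict.empty, []) (by intro c v h; simp [PySem.Dict.get?_empty] at h)]
  simp [PySem.Set.update_nil_left, PySem.Set.empty]
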